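-- pv_equiv track=rewrite | github.com/chi-collective/genparse | src/genparse/canonical_tokenization/util.py | topologically_order_merge_list
-- ===== SOURCE A (Python) =====
-- from functools import lru_cache
-- from collections import defaultdict
--
-- def topologically_order_merge_list(vocab, merge_list):
--     # The set of composite tokens are those that are defined by concatenation of
--     # at least one pair of tokens by a merge rule.
--
--     # map from a token string to its possible splits into sub-tokens
--     tmp = defaultdict(list)
--     for x, y in merge_list:
--         tmp[x + y].append((x, y))
--     composite_tokens = set(tmp)
--
--     # the base alphabet is any token in the vocabulary that is not a composite
--     # token.
--     base_alphabet = set()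
--     for u, v in merge_list:
--         for x in (u, v):
--             if x not in composite_tokens:
--                 base_alphabet.add(x)
--     for x in vocab:
--         if x not in composite_tokens:
--             base_alphabet.add(x)
--
--     # TODO: untested
--     assert base_alphabet == vocab - composite_tokens
--
--     @lru_cache
--     def height(x):
--         # The height of x's tallest derivation."
--         if x in base_alphabet:
--             return 1
--         else:
--             return 1 + max(max(height(u), height(v)) for u, v in tmp[x])
--
--     # enforce the topological ordering
--     return sorted(merge_list, key=lambda uv: height(uv[0] + uv[1]))
-- ===== SOURCE B (Python) =====
-- def topologically_order_merge_list(vocab, merge_list):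
--     # map from a token string to its possible splits into sub-tokens
--     splits = {}
--     for x, y in merge_list:
--         splits.setdefault(x + y, []).append((x, y))
--     composite_tokens = set(splits)
--
--     # validity check kept from the original: the base alphabet (non-composite
--     # tokens mentioned in merge rules or in the vocabulary) must be exactly the
--     # non-composite part of the vocabulary
--     base_alphabet = {t for pair in merge_list for t in pair if t not in composite_tokens}
--     base_alphabet |= {t for t in vocab if t not in composite_tokens}
--     assert base_alphabet == vocab - composite_tokens
--
--     # Iterative heights instead of lru_cache recursion: a composite token is
--     # strictly longer than either of its parts, so processing composite tokens
--     # in increasing length order resolves every height in one pass; any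
--     # non-composite token has height 1 (the default).
--     heights = {}
--     for t in sorted(splits, key=len):
--         heights[t] = 1 + max(max(heights.get(u, 1), heights.get(v, 1))
--                              for u, v in splits[t])
--
--     # enforce the topological ordering (stable, identical key values)
--     return sorted(merge_list, key=lambda uv: heights[uv[0] + uv[1]])
-- ===== Notes on version B (the rewrite author's own statement) =====
-- stated objective: alternative
-- what changed: The lru_cache recursive height function is replaced by a single non-recursive bottom-up pass: composite tokens are processed in increasing length order (every part of a composite is strictly shorter), with height 1 as the default for non-composite tokens, so no recursion or memo cache is needed; the split map, validity assert and final stable sort are kept.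
import Mathlib
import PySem

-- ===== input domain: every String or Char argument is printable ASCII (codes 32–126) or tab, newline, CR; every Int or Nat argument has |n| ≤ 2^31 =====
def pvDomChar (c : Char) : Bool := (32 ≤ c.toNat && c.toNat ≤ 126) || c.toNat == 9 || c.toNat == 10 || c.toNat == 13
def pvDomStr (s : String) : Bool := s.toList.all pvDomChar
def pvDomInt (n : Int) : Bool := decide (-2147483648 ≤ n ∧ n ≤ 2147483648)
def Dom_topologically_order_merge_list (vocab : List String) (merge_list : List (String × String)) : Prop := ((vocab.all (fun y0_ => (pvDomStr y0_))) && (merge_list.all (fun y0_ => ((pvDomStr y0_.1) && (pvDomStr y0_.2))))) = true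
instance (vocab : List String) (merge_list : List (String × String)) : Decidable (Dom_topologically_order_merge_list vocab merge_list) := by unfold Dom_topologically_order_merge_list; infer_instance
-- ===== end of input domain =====

-- B replaces A's lru_cache recursion (and the base-alphabet set it consults) by one
-- non-recursive bottom-up pass over the composite tokens in increasing length order
-- (objective: alternative; same result, A = B proved on Pre_).

-- ===== PORT A =====
-- height(x) of A, ported with a fuel counter as the totality guard (the Python
-- recursion strictly decreases the string length under Pre_, where every merge
-- component is nonempty; outside Pre_ the Python raises instead of returning).
-- max(generator) is PySem.List.max? with identity key; its .getD 0 is only a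
-- totality guard for the empty generator, on which the Python raises ValueError
-- (unreachable under Pre_).
def pvHeightA (base : PySem.Set String) (tmp : PySem.Dict String (List (String × String))) : Nat → String → Int
  | 0, _ => 0
  | (fuel+1), x =>
    if PySem.Set.contains base x then 1
    else 1 + ((PySem.List.max? ((tmp.getD x []).map
        (fun uv => max (pvHeightA base tmp fuel uv.1) (pvHeightA base tmp fuel uv.2)))
        (fun y => y)).getD 0)

def topologically_order_merge_list (vocab : List String) (merge_list : List (String × String)) : List (String × String) :=
  -- tmp = defaultdict(list); for x, y in merge_list: tmp[x + y].append((x, y))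
  let tmp : PySem.Dict String (List (String × String)) :=
    merge_list.foldl (fun d p => d.modify (p.1 ++ p.2) [] (fun l => l ++ [p])) PySem.Dict.empty
  let composite_tokens : PySem.Set String := PySem.Set.ofList tmp.keys
  -- base_alphabet: the two loops adding non-composite tokens
  let b1 : PySem.Set String :=
    merge_list.foldl (fun s p =>
      [p.1, p.2].foldl (fun s x => if PySem.Set.contains composite_tokens x then s else PySem.Set.add s x) s)
      PySem.Set.empty
  let base_alphabet : PySem.Set String :=
    vocab.foldl (fun s x => if PySem.Set.contains composite_tokens x then s else PySem.Set.add s x) b1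
  -- (the assert raises outside Pre_ and returns no value; it does not change the result)
  PySem.List.sorted merge_list
    (fun uv => pvHeightA base_alphabet tmp (uv.1 ++ uv.2).toList.length (uv.1 ++ uv.2)) false

-- ===== PORT B =====
def topologically_order_merge_list_alt (vocab : List String) (merge_list : List (String × String)) : List (String × String) :=
  -- splits.setdefault(x + y, []).append((x, y))  ==  splits[x+y] = splits.get(x+y, []) + [(x,y)]
  let splits : PySem.Dict String (List (String × String)) :=
    merge_list.foldl (fun d p => d.modify (p.1 ++ p.2) [] (fun l => l ++ [p])) PySem.Dict.empty
  let composite_tokens : PySem.Set String := PySem.Set.ofList splits.keys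
  -- base_alphabet feeds only the assert, which raises outside Pre_ and returns no
  -- value; it does not contribute to the returned value
  let _base_alphabet : PySem.Set String :=
    PySem.Set.union
      (PySem.Set.ofList ((merge_list.flatMap (fun p => [p.1, p.2])).filter
        (fun t => !PySem.Set.contains composite_tokens t)))
      (vocab.filter (fun t => !PySem.Set.contains composite_tokens t))
  -- for t in sorted(splits, key=len): heights[t] = 1 + max(...)
  -- splits[t] is present for every t iterated (t comes from splits' keys): getD [] is a totality guard;
  -- heights.get(u, 1) is getD u 1; max(generator) is max? with identity key, .getD 0 a totality guard.
  let heights : PySem.Dict String Int :=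
    (PySem.List.sorted splits.keys (fun t => PySem.Str.len t) false).foldl
      (fun hd t => hd.insert t (1 + ((PySem.List.max? ((splits.getD t []).map
          (fun uv => max (hd.getD uv.1 1) (hd.getD uv.2 1))) (fun y => y)).getD 0)))
      PySem.Dict.empty
  -- heights[uv[0] + uv[1]]: the key is always present (every concat is a key of splits); getD 1 is a totality guard
  PySem.List.sorted merge_list (fun uv => heights.getD (uv.1 ++ uv.2) 1) false

-- ===== PRECONDITION & SPEC =====
-- Pre_ excludes exactly the inputs on which the Python A raises: those failing the
-- assert base_alphabet == vocab - composite_tokens (AssertionError; equivalent to: every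
-- token occurring in a merge pair is composite or in vocab), and those with an empty
-- string in a merge pair, on which height() recurses through a token that is its own
-- sub-token (RecursionError).
def Pre_topologically_order_merge_list (vocab : List String) (merge_list : List (String × String)) : Prop :=
  (∀ p ∈ merge_list, p.1 ≠ "" ∧ p.2 ≠ "") ∧
  (∀ p ∈ merge_list, ∀ x ∈ [p.1, p.2], (∃ q ∈ merge_list, q.1 ++ q.2 = x) ∨ x ∈ vocab)
instance (vocab : List String) (merge_list : List (String × String)) : Decidable (Pre_topologically_order_merge_list vocab merge_list) := by unfold Pre_topologically_order_merge_list; infer_instance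

def pvWitness_topologically_order_merge_list : List String × (List (String × String)) :=
  (["a", "b", "c", "d"], [("a", "b"), ("ab", "c"), ("c", "d")])

def Spec_topologically_order_merge_list (vocab : List String) (merge_list : List (String × String)) (out : List (String × String)) : Prop := out = topologically_order_merge_list_alt vocab merge_list
instance (vocab : List String) (merge_list : List (String × String)) (out : List (String × String)) : Decidable (Spec_topologically_order_merge_list vocab merge_list out) := by unfold Spec_topologically_order_merge_list; infer_instance

-- ===== CLAIM (what is proved, stated in full; the proofs are below) =====
def Claim_equal_topologically_order_merge_list : Prop := ∀ (vocab : List String) (merge_list : List (String × String)), Dom_topologically_order_merge_list vocab merge_list → Pre_topologically_order_merge_list vocab merge_list → Spec_topologically_order_merge_list vocab merge_list (topologically_order_merge_list vocab merge_list)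

-- ===== LEMMAS AND PROOFS =====

-- Abbreviations for the shared structures (used only by the proofs).
def pvTmp (L : List (String × String)) : PySem.Dict String (List (String × String)) :=
  L.foldl (fun d p => d.modify (p.1 ++ p.2) [] (fun l => l ++ [p])) PySem.Dict.empty

def pvBase (vocab : List String) (L : List (String × String)) : PySem.Set String :=
  let composite := PySem.Set.ofList (pvTmp L).keys
  let b1 := L.foldl (fun s p =>
      [p.1, p.2].foldl (fun s x => if PySem.Set.contains composite x then s else PySem.Set.add s x) s)
      PySem.Set.empty
  vocab.foldl (fun s x => if PySem.Set.contains composite x then s else PySem.Set.add s x) b1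

def pvStep (L : List (String × String)) (hd : PySem.Dict String Int) (t : String) : PySem.Dict String Int :=
  hd.insert t (1 + ((PySem.List.max? (((pvTmp L).getD t []).map
      (fun uv => max (hd.getD uv.1 1) (hd.getD uv.2 1))) (fun y => y)).getD 0))

def pvH (L : List (String × String)) : PySem.Dict String Int :=
  (PySem.List.sorted (pvTmp L).keys (fun t => PySem.Str.len t) false).foldl (pvStep L) PySem.Dict.empty

lemma pvTmp_getD (L : List (String × String)) (c : String) :
    (pvTmp L).getD c [] = L.filter (fun p => p.1 ++ p.2 == c) := by
  have : pvTmp L = (L.map (fun p => (p.1 ++ p.2, p))).foldl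
      (fun d q => d.modify q.1 [] (fun l => l ++ [q.2])) PySem.Dict.empty := by
    rw [List.foldl_map]
    rfl
  rw [this, PySem.Dict.getD_foldl_modify_append]
  simp [List.filter_map, Function.comp_def]

lemma pvTmp_mem_keys (L : List (String × String)) (x : String) :
    x ∈ (pvTmp L).keys ↔ ∃ p ∈ L, p.1 ++ p.2 = x := by
  have h := PySem.Dict.keys_foldl_modify_key L (fun p => p.1 ++ p.2) ([] : List (String × String))
      (fun _ p l => l ++ [p]) PySem.Dict.empty
  unfold pvTmp
  rw [show (fun (d : PySem.Dict String (List (String × String))) (p : String × String) =>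
      d.modify (p.1 ++ p.2) [] (fun l => l ++ [p])) = (fun d p => d.modify (p.1 ++ p.2) []
      ((fun _ p l => l ++ [p]) d p)) from rfl, h]
  simp [PySem.Dict.keys_empty, PySem.Set.update_nil_left, PySem.Set.mem_ofList]

lemma pvTmp_keys_nodup (L : List (String × String)) : (pvTmp L).keys.Nodup := by
  have h := PySem.Dict.nodup_keys_foldl_modify_key L (fun p => p.1 ++ p.2) ([] : List (String × String))
      (fun _ p l => l ++ [p]) PySem.Dict.empty (by simp [PySem.Dict.keys_empty])
  exact h

lemma pv_mem_fold_addif (c : String → Bool) (l : List String) (s : PySem.Set String) (x : String) :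
    x ∈ l.foldl (fun s y => if c y then s else PySem.Set.add s y) s ↔
      x ∈ s ∨ (x ∈ l ∧ c x = false) := by
  induction l generalizing s with
  | nil => simp
  | cons y l ih =>
    by_cases hy : c y = true <;>
      simp only [List.foldl_cons, hy, if_true] <;>
      aesop

lemma pv_mem_fold2 (c : String → Bool) (L : List (String × String)) (s : PySem.Set String) (x : String) :
    x ∈ L.foldl (fun s p =>
        [p.1, p.2].foldl (fun s y => if c y then s else PySem.Set.add s y) s) s ↔
      x ∈ s ∨ ((∃ p ∈ L, x = p.1 ∨ x = p.2) ∧ c x = false) := by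
  induction L generalizing s with
  | nil => simp
  | cons p L ih =>
    simp only [List.foldl_cons, List.mem_cons]
    aesop

lemma pvBase_mem (vocab : List String) (L : List (String × String)) (x : String) :
    x ∈ pvBase vocab L ↔
      ((∃ p ∈ L, x = p.1 ∨ x = p.2) ∨ x ∈ vocab) ∧ x ∉ (pvTmp L).keys := by
  unfold pvBase
  rw [pv_mem_fold_addif, pv_mem_fold2]
  have hc : (PySem.Set.contains (PySem.Set.ofList (pvTmp L).keys) x = false) ↔ x ∉ (pvTmp L).keys := by
    rw [← Bool.not_eq_true, PySem.Set.contains_iff, PySem.Set.mem_ofList]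
  simp only [PySem.Set.empty]
  constructor
  · rintro ((h | ⟨hm, hcc⟩) | ⟨hv, hcc⟩)
    · simp at h
    · exact ⟨Or.inl hm, hc.mp hcc⟩
    · exact ⟨Or.inr hv, hc.mp hcc⟩
  · rintro ⟨(hm | hv), hk⟩
    · exact Or.inl (Or.inr ⟨hm, hc.mpr hk⟩)
    · exact Or.inr ⟨hv, hc.mpr hk⟩

lemma pvH_pres (L : List (String × String)) (ks : List String) (hd : PySem.Dict String Int)
    (x : String) (d : Int) (hx : x ∉ ks) :
    (ks.foldl (pvStep L) hd).getD x d = hd.getD x d := by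
  induction ks generalizing hd with
  | nil => rfl
  | cons t ks ih =>
    have hxt : x ≠ t := fun h => hx (h ▸ List.mem_cons_self ..)
    have hxk : x ∉ ks := fun h => hx (List.mem_cons_of_mem _ h)
    rw [List.foldl_cons, ih _ hxk]
    exact PySem.Dict.getD_insert_of_ne _ _ _ hxt

lemma pvH_fix (L : List (String × String)) (ks : List String)
    (nd : ks.Nodup)
    (srt : ks.Pairwise (fun a b => a.toList.length ≤ b.toList.length))
    (ch : ∀ t ∈ ks, ∀ p ∈ (pvTmp L).getD t [],
      p.1.toList.length < t.toList.length ∧ p.2.toList.length < t.toList.length) :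
    ∀ hd, ∀ x ∈ ks, (ks.foldl (pvStep L) hd).getD x 1 =
      1 + ((PySem.List.max? (((pvTmp L).getD x []).map
        (fun uv => max ((ks.foldl (pvStep L) hd).getD uv.1 1) ((ks.foldl (pvStep L) hd).getD uv.2 1)))
        (fun y => y)).getD 0) := by
  induction ks with
  | nil => intro hd x hx; exact absurd hx (List.not_mem_nil)
  | cons t ks ih =>
    intro hd x hx
    rcases List.mem_cons.mp hx with rfl | hxk
    · -- x = t : the value written now is never overwritten, and the children are stable
      have hxnotk : x ∉ ks := (List.nodup_cons.mp nd).1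
      rw [List.foldl_cons, pvH_pres L ks _ x 1 hxnotk]
      have hch := ch x (List.mem_cons_self ..)
      have hcongr : ∀ uv ∈ (pvTmp L).getD x [],
          (fun uv => max ((ks.foldl (pvStep L) (pvStep L hd x)).getD uv.1 1)
            ((ks.foldl (pvStep L) (pvStep L hd x)).getD uv.2 1)) uv
          = (fun uv => max (hd.getD uv.1 1) (hd.getD uv.2 1)) uv := by
        intro uv huv
        have h1 := (hch uv huv).1
        have h2 := (hch uv huv).2
        have hnot1 : uv.1 ∉ ks := fun hm =>
          absurd ((List.pairwise_cons.mp srt).1 uv.1 hm) (by omega)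
        have hnot2 : uv.2 ∉ ks := fun hm =>
          absurd ((List.pairwise_cons.mp srt).1 uv.2 hm) (by omega)
        have hne1 : uv.1 ≠ x := fun h => by rw [h] at h1; omega
        have hne2 : uv.2 ≠ x := fun h => by rw [h] at h2; omega
        simp only [pvH_pres L ks _ _ 1 hnot1, pvH_pres L ks _ _ 1 hnot2]
        unfold pvStep
        rw [PySem.Dict.getD_insert_of_ne _ _ _ hne1, PySem.Dict.getD_insert_of_ne _ _ _ hne2]
      rw [List.map_congr_left hcongr]
      unfold pvStep
      rw [PySem.Dict.getD_insert_self]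
    · rw [List.foldl_cons]
      exact ih (List.nodup_cons.mp nd).2 (List.pairwise_cons.mp srt).2
        (fun t' ht' => ch t' (List.mem_cons_of_mem _ ht')) (pvStep L hd t) x hxk

lemma pv_toList_ne_nil (s : String) (h : s ≠ "") : s.toList ≠ [] := by
  intro hl
  exact h (by rwa [← String.toList_eq_nil_iff])

lemma pvHeight_eq (vocab : List String) (L : List (String × String))
    (pre1 : ∀ p ∈ L, p.1 ≠ "" ∧ p.2 ≠ "") :
    ∀ fuel (x : String), 1 ≤ x.toList.length → x.toList.length ≤ fuel →
      (x ∈ (pvTmp L).keys ∨ x ∈ pvBase vocab L) →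
      pvHeightA (pvBase vocab L) (pvTmp L) fuel x = (pvH L).getD x 1 := by
  have keysnd : ((PySem.List.sorted (pvTmp L).keys (fun t => PySem.Str.len t) false)).Nodup :=
    (PySem.List.sorted_perm (pvTmp L).keys (fun t => PySem.Str.len t) false).nodup_iff.mpr
      (pvTmp_keys_nodup L)
  have keyssrt : ((PySem.List.sorted (pvTmp L).keys (fun t => PySem.Str.len t) false)).Pairwise
      (fun a b => a.toList.length ≤ b.toList.length) := by
    have := PySem.List.sorted_pairwise (pvTmp L).keys (fun t => PySem.Str.len t)
    refine this.imp ?_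
    intro a b h
    simpa [PySem.Str.len_eq] using h
  have keysch : ∀ t ∈ (PySem.List.sorted (pvTmp L).keys (fun t => PySem.Str.len t) false),
      ∀ p ∈ (pvTmp L).getD t [],
        p.1.toList.length < t.toList.length ∧ p.2.toList.length < t.toList.length := by
    intro t _ p hp
    rw [pvTmp_getD] at hp
    have hmem := List.mem_of_mem_filter hp
    have heq : p.1 ++ p.2 = t := by simpa using List.of_mem_filter hp
    have h1 := pv_toList_ne_nil _ (pre1 p hmem).1
    have h2 := pv_toList_ne_nil _ (pre1 p hmem).2
    have : t.toList = p.1.toList ++ p.2.toList := by rw [← heq, String.toList_append]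
    rw [this, List.length_append]
    constructor
    · have := List.length_pos_of_ne_nil h2; omega
    · have := List.length_pos_of_ne_nil h1; omega
  intro fuel
  induction fuel with
  | zero => intro x h1 h2; omega
  | succ fuel ih =>
    intro x h1 h2 hgood
    show (if PySem.Set.contains (pvBase vocab L) x then 1
      else 1 + ((PySem.List.max? (((pvTmp L).getD x []).map
        (fun uv => max (pvHeightA (pvBase vocab L) (pvTmp L) fuel uv.1)
          (pvHeightA (pvBase vocab L) (pvTmp L) fuel uv.2))) (fun y => y)).getD 0)) = _
    by_cases hb : PySem.Set.contains (pvBase vocab L) x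
    · rw [if_pos hb]
      have hnk : x ∉ (pvTmp L).keys :=
        ((pvBase_mem vocab L x).mp (PySem.Set.contains_iff _ _ |>.mp hb)).2
      have hnks : x ∉ (PySem.List.sorted (pvTmp L).keys (fun t => PySem.Str.len t) false) := by
        rw [PySem.List.mem_sorted]; exact hnk
      unfold pvH
      rw [pvH_pres L _ _ _ _ hnks, PySem.Dict.getD_empty]
    · rw [if_neg hb]
      have hxbase : x ∉ pvBase vocab L := fun hm => hb ((PySem.Set.contains_iff _ _).mpr hm)
      have hxkeys : x ∈ (pvTmp L).keys := by
        rcases hgood with h | h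
        · exact h
        · exact absurd h hxbase
      have hxs : x ∈ (PySem.List.sorted (pvTmp L).keys (fun t => PySem.Str.len t) false) := by
        rw [PySem.List.mem_sorted]; exact hxkeys
      have hfix := pvH_fix L _ keysnd keyssrt keysch PySem.Dict.empty x hxs
      rw [show (PySem.List.sorted (pvTmp L).keys (fun t => PySem.Str.len t) false).foldl
        (pvStep L) PySem.Dict.empty = pvH L from rfl] at hfix
      rw [hfix]
      congr 3
      apply List.map_congr_left
      intro uv huv
      have hch := keysch x hxs uv huv
      rw [pvTmp_getD] at huv
      have hmemL := List.mem_of_mem_filter huv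
      have hu1 := pv_toList_ne_nil _ (pre1 uv hmemL).1
      have hu2 := pv_toList_ne_nil _ (pre1 uv hmemL).2
      have hl1 := List.length_pos_of_ne_nil hu1
      have hl2 := List.length_pos_of_ne_nil hu2
      have good1 : uv.1 ∈ (pvTmp L).keys ∨ uv.1 ∈ pvBase vocab L := by
        by_cases h : uv.1 ∈ (pvTmp L).keys
        · exact Or.inl h
        · exact Or.inr ((pvBase_mem vocab L uv.1).mpr ⟨Or.inl ⟨uv, hmemL, Or.inl rfl⟩, h⟩)
      have good2 : uv.2 ∈ (pvTmp L).keys ∨ uv.2 ∈ pvBase vocab L := by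
        by_cases h : uv.2 ∈ (pvTmp L).keys
        · exact Or.inl h
        · exact Or.inr ((pvBase_mem vocab L uv.2).mpr ⟨Or.inl ⟨uv, hmemL, Or.inr rfl⟩, h⟩)
      rw [ih uv.1 hl1 (by omega) good1, ih uv.2 hl2 (by omega) good2]

lemma pv_insertBy_congr {α : Type} (k1 k2 : α → Int) (x : α) (ys : List α)
    (hx : k1 x = k2 x) (h : ∀ y ∈ ys, k1 y = k2 y) :
    PySem.List.insertBy (fun a b => decide (k1 a < k1 b)) x ys
      = PySem.List.insertBy (fun a b => decide (k2 a < k2 b)) x ys := by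
  induction ys with
  | nil => rfl
  | cons y ys ih =>
    have hy : k1 y = k2 y := h y (List.mem_cons_self ..)
    simp only [PySem.List.insertBy, hx, hy]
    split_ifs with h' <;> simp_all

lemma pv_foldl_insertBy_congr {α : Type} (xs : List α) (k1 k2 : α → Int)
    (h : ∀ x ∈ xs, k1 x = k2 x) :
    ∀ acc, (∀ a ∈ acc, k1 a = k2 a) →
      xs.foldl (fun acc x => PySem.List.insertBy (fun a b => decide (k1 a < k1 b)) x acc) acc
        = xs.foldl (fun acc x => PySem.List.insertBy (fun a b => decide (k2 a < k2 b)) x acc) acc := by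
  induction xs with
  | nil => intro acc _; rfl
  | cons x xs ih =>
    intro acc hacc
    have hx := h x (List.mem_cons_self ..)
    rw [List.foldl_cons, List.foldl_cons, pv_insertBy_congr k1 k2 x acc hx hacc]
    refine ih (fun y hy => h y (List.mem_cons_of_mem _ hy)) _ (fun a ha => ?_)
    rcases (PySem.List.mem_insertBy _ _ _ _).mp ha with rfl | ha'
    · exact hx
    · exact hacc a ha'

lemma pv_sorted_congr {α : Type} (xs : List α) (k1 k2 : α → Int)
    (h : ∀ x ∈ xs, k1 x = k2 x) :
    PySem.List.sorted xs k1 false = PySem.List.sorted xs k2 false := by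
  rw [PySem.List.sorted_eq_foldl_insertBy, PySem.List.sorted_eq_foldl_insertBy]
  exact pv_foldl_insertBy_congr xs k1 k2 h [] (by simp)

-- ===== VERDICT (by name: the statement is the Claim_ definition above) =====
theorem topologically_order_merge_list_spec : Claim_equal_topologically_order_merge_list := by
  intro vocab L _hdom hpre
  unfold Spec_topologically_order_merge_list
  have hA : topologically_order_merge_list vocab L = PySem.List.sorted L
      (fun uv => pvHeightA (pvBase vocab L) (pvTmp L) (uv.1 ++ uv.2).toList.length (uv.1 ++ uv.2)) false := rfl
  have hB : topologically_order_merge_list_alt vocab L = PySem.List.sorted L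
      (fun uv => (pvH L).getD (uv.1 ++ uv.2) 1) false := rfl
  rw [hA, hB]
  apply pv_sorted_congr
  intro p hp
  obtain ⟨hpre1, _⟩ := hpre
  have h1 := pv_toList_ne_nil _ (hpre1 p hp).1
  have hlen : 1 ≤ (p.1 ++ p.2).toList.length := by
    rw [String.toList_append, List.length_append]
    have := List.length_pos_of_ne_nil h1; omega
  exact pvHeight_eq vocab L hpre1 _ _ hlen le_rfl (Or.inl ((pvTmp_mem_keys L _).mpr ⟨p, hp, rfl⟩))
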